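-- pv_equiv track=rewrite | github.com/yyssl88/REEs_Discovery | mls-server/src/main/resources/python/sampling/RW/func.py | constructPLIs
-- ===== SOURCE A (Python) =====
-- from collections import defaultdict
--
-- def constructPLIOneColumn(dataset, cid, tidStart):
--     pli = defaultdict(list)
--     for line_id, record in enumerate(dataset):
--         pli[record[cid]].append(line_id + tidStart)
--     return pli
--
-- def constructPLIs(datasets, schemas, relations, tidStarts):
--     plis = []
--     for rid, rname in enumerate(relations):
--         pli_onedata = []
--         dataset, schema, tidStart = datasets[rid], schemas[rid], tidStarts[rid]
--         for cid in range(len(schema)):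
--             pli = constructPLIOneColumn(dataset, cid, tidStart)
--             pli_onedata.append(pli)
--         plis.append(pli_onedata)
--     return plis
-- ===== SOURCE B (Python) =====
-- from collections import defaultdict
--
-- def pli_of_column(col, tidStart):
--     # distinct values in first-occurrence order, then one gather per value
--     return defaultdict(list, {k: [i + tidStart for i, v in enumerate(col) if v == k]
--                               for k in dict.fromkeys(col)})
--
-- def constructPLIs(datasets, schemas, relations, tidStarts):
--     return [
--         [pli_of_column([rec[cid] for rec in datasets[rid]], tidStarts[rid])
--          for cid in range(len(schemas[rid]))]
--         for rid in range(len(relations))]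
-- ===== Notes on version B (the rewrite author's own statement) =====
-- stated objective: alternative
-- what changed: A grows each column's dict record by record (one full dataset scan per column appending into a defaultdict); B never builds a dict incrementally: per column it deduplicates the column's values once (first-occurrence order) and constructs each value's tid list by its own filtered comprehension over the enumerated column.
-- outside the precondition, e.g. on constructPLIs([[['a']]], [['c0', 'c1']], ['r'], [0]): A raises IndexError, B raises IndexError; on constructPLIs([], [], ['r'], []): A raises IndexError, B raises IndexError
import Mathlib
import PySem

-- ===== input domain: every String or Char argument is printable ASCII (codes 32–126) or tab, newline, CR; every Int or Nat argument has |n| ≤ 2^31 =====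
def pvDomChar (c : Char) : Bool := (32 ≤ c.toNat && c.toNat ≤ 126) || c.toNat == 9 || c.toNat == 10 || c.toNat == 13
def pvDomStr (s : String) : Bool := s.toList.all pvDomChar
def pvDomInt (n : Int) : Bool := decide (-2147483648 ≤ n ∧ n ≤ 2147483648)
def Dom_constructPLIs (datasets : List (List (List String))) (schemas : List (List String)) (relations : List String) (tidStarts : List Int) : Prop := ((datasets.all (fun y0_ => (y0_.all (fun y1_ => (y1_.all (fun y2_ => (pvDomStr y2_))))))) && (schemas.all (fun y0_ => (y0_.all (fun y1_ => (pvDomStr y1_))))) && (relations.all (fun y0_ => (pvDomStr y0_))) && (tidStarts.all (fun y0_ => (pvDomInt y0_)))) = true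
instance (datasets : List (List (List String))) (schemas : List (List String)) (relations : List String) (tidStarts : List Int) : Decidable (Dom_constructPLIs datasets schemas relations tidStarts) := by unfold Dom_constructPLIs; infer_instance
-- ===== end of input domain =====

-- B replaces A's incremental dict-growing scans by a dedup-then-gather construction:
-- per column it lists the distinct values once and builds each value's tid list by its
-- own filtered comprehension (alternative algorithm, same return value).

-- ===== PORT A =====
def constructPLIOneColumn (dataset : List (List String)) (cid : Nat) (tidStart : Int) : PySem.Dict String (List Int) :=
  (PySem.List.enumerate dataset 0).foldl
    (fun pli p => pli.modify (PySem.List.pyGetD p.2 (cid : Int) "") [] (fun l => l ++ [p.1 + tidStart]))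
    PySem.Dict.empty

def constructPLIs (datasets : List (List (List String))) (schemas : List (List String)) (relations : List String) (tidStarts : List Int) : List (List (List (String × List Int))) :=
  (PySem.List.enumerate relations 0).foldl
    (fun plis p =>
      let dataset := PySem.List.pyGetD datasets p.1 []
      let schema := PySem.List.pyGetD schemas p.1 []
      let tidStart := PySem.List.pyGetD tidStarts p.1 0
      plis ++ [(List.range schema.length).foldl
        (fun onedata cid => onedata ++ [(constructPLIOneColumn dataset cid tidStart).items]) []])
    []

-- ===== PORT B =====
def pliOfColumn (col : List String) (tidStart : Int) : List (String × List Int) :=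
  (PySem.List.dedup col).map (fun k =>
    (k, ((PySem.List.enumerate col 0).filter (fun q => q.2 == k)).map (fun q => q.1 + tidStart)))

def constructPLIs_alt (datasets : List (List (List String))) (schemas : List (List String)) (relations : List String) (tidStarts : List Int) : List (List (List (String × List Int))) :=
  (List.range relations.length).map (fun (rid : Nat) =>
    (List.range (PySem.List.pyGetD schemas (rid : Int) []).length).map (fun (cid : Nat) =>
      pliOfColumn
        ((PySem.List.pyGetD datasets (rid : Int) []).map (fun rec => PySem.List.pyGetD rec (cid : Int) ""))
        (PySem.List.pyGetD tidStarts (rid : Int) 0)))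

-- ===== PRECONDITION & SPEC =====
-- Pre_ excludes exactly the inputs where Python A raises IndexError: relations longer than
-- one of the parallel lists, or a record shorter than its relation's schema.
def Pre_constructPLIs (datasets : List (List (List String))) (schemas : List (List String)) (relations : List String) (tidStarts : List Int) : Prop :=
  relations.length ≤ datasets.length ∧ relations.length ≤ schemas.length ∧
  relations.length ≤ tidStarts.length ∧
  ∀ rid < relations.length, ∀ rec ∈ datasets.getD rid [], (schemas.getD rid []).length ≤ rec.length
instance (datasets : List (List (List String))) (schemas : List (List String)) (relations : List String) (tidStarts : List Int) : Decidable (Pre_constructPLIs datasets schemas relations tidStarts) := by unfold Pre_constructPLIs; infer_instance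

def pvWitness_constructPLIs : List (List (List String)) × List (List String) × List String × List Int :=
  ([[["a", "x"], ["b", "x"], ["a", "y"]]], [["c0", "c1"]], ["r0"], [7])

def Spec_constructPLIs (datasets : List (List (List String))) (schemas : List (List String)) (relations : List String) (tidStarts : List Int) (out : List (List (List (String × List Int)))) : Prop := out = constructPLIs_alt datasets schemas relations tidStarts
instance (datasets : List (List (List String))) (schemas : List (List String)) (relations : List String) (tidStarts : List Int) (out : List (List (List (String × List Int)))) : Decidable (Spec_constructPLIs datasets schemas relations tidStarts out) := by unfold Spec_constructPLIs; infer_instance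

-- ===== CLAIM (what is proved, stated in full; the proofs are below) =====
def Claim_equal_constructPLIs : Prop := ∀ (datasets : List (List (List String))) (schemas : List (List String)) (relations : List String) (tidStarts : List Int), Dom_constructPLIs datasets schemas relations tidStarts → Pre_constructPLIs datasets schemas relations tidStarts → Spec_constructPLIs datasets schemas relations tidStarts (constructPLIs datasets schemas relations tidStarts)

-- ===== LEMMAS AND PROOFS =====

-- enumerate over a mapped list enumerates the original list and maps the payload.
theorem pv_enumerate_map {α β : Type} (f : α → β) :
    ∀ (xs : List α) (s : Int),
      PySem.List.enumerate (xs.map f) s = (PySem.List.enumerate xs s).map (fun p => (p.1, f p.2)) := by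
  intro xs
  induction xs with
  | nil => intro s; rfl
  | cons x t ih =>
    intro s
    simp [PySem.List.enumerate_cons, ih]

-- One column of A's result, as B computes it: A's record-by-record dict fold has the
-- items "distinct values in first-occurrence order, each with its filtered tid list".
theorem pv_column (dataset : List (List String)) (cid : Nat) (t : Int) :
    (constructPLIOneColumn dataset cid t).items
      = pliOfColumn (dataset.map (fun rec => PySem.List.pyGetD rec (cid : Int) "")) t := by
  have h1 : constructPLIOneColumn dataset cid t
      = ((PySem.List.enumerate dataset 0).map
            (fun p => (PySem.List.pyGetD p.2 (cid : Int) "", p.1 + t))).foldl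
          (fun d q => d.modify q.1 [] (fun v => v ++ [q.2])) PySem.Dict.empty := by
    unfold constructPLIOneColumn
    rw [List.foldl_map]
  have hnd : (constructPLIOneColumn dataset cid t).keys.Nodup := by
    rw [h1]
    exact PySem.Dict.nodup_keys_foldl_modify_key _ Prod.fst []
      (fun _ q => (fun v => v ++ [q.2])) PySem.Dict.empty (by simp [PySem.Dict.keys_empty])
  have hkeys : (constructPLIOneColumn dataset cid t).keys
      = PySem.Set.ofList (dataset.map (fun rec => PySem.List.pyGetD rec (cid : Int) "")) := by
    rw [h1, PySem.Dict.keys_foldl_modify_key _ Prod.fst []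
      (fun _ q => (fun v => v ++ [q.2])) PySem.Dict.empty]
    have hmap : ((PySem.List.enumerate dataset 0).map
          (fun p => (PySem.List.pyGetD p.2 (cid : Int) "", p.1 + t))).map Prod.fst
        = dataset.map (fun rec => PySem.List.pyGetD rec (cid : Int) "") := by
      rw [List.map_map,
        show ((Prod.fst ∘ fun p : Int × List String => (PySem.List.pyGetD p.2 (cid : Int) "", p.1 + t))
          = (fun rec => PySem.List.pyGetD rec (cid : Int) "") ∘ Prod.snd) from rfl,
        ← List.map_map, PySem.List.map_snd_enumerate]
    rw [hmap, PySem.Dict.keys_empty]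
    rfl
  rw [PySem.Dict.items_eq_map_keys _ hnd [], hkeys]
  unfold pliOfColumn
  rw [PySem.List.dedup_eq_ofList]
  apply List.map_congr_left
  intro k _
  have hg : (constructPLIOneColumn dataset cid t).getD k []
      = (((PySem.List.enumerate dataset 0).map
            (fun p => (PySem.List.pyGetD p.2 (cid : Int) "", p.1 + t))).filter
          (fun p => p.1 == k)).map (fun p => p.2) := by
    rw [h1, PySem.Dict.getD_foldl_modify_append]
    simp [PySem.Dict.getD_empty]
  rw [hg, pv_enumerate_map (fun rec => PySem.List.pyGetD rec (cid : Int) "") dataset 0]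
  simp only [List.filter_map, List.map_map]
  rfl

-- A map over enumerate(xs) whose body agrees with a map over range(len(xs)).
theorem pv_outer_aux {α β : Type} (F : Int × α → β) (G : Nat → β)
    (h : ∀ (n : Nat) (x : α), F ((n : Int), x) = G n) :
    ∀ (xs : List α) (s : Nat),
      (PySem.List.enumerate xs (s : Int)).map F = (List.range' s xs.length).map G := by
  intro xs
  induction xs with
  | nil => intro s; rfl
  | cons x tl ih =>
    intro s
    have hs : (s : Int) + 1 = ((s + 1 : Nat) : Int) := by push_cast; ring
    rw [List.length_cons, List.range'_succ, PySem.List.enumerate_cons, List.map_cons,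
      List.map_cons, h s x, hs, ih (s + 1)]

theorem pv_outer {α β : Type} (F : Int × α → β) (G : Nat → β)
    (h : ∀ (n : Nat) (x : α), F ((n : Int), x) = G n) (xs : List α) :
    (PySem.List.enumerate xs 0).map F = (List.range xs.length).map G := by
  rw [List.range_eq_range']
  exact pv_outer_aux F G h xs 0

-- ===== VERDICT (by name: the statement is the Claim_ definition above) =====
theorem constructPLIs_spec : Claim_equal_constructPLIs := by
  intro datasets schemas relations tidStarts _ _
  unfold Spec_constructPLIs constructPLIs constructPLIs_alt
  rw [PySem.List.foldl_append_singleton_eq_map, List.nil_append]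
  apply pv_outer
  intro rid _
  dsimp only
  rw [PySem.List.foldl_append_singleton_eq_map, List.nil_append]
  apply List.map_congr_left
  intro cid _
  exact pv_column _ _ _
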